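-- pv_equiv track=rewrite | github.com/SEL-Columbia/formhub | xls2xform/pyxform_include_packager.py | gather_includes
-- ===== SOURCE A (Python) =====
-- def gather_includes(section=[], includes_dict={}, destination=[]):
--     for q in section:
--         if q[u'type'] == u'include':
--             include_name = q[u'name']
--             inner_section = includes_dict.pop(include_name, None)
--             if inner_section != None:
--                 gather_includes(section=inner_section,
--                     includes_dict=includes_dict, destination=destination)
--         else:
--             destination.append(q)
--     return destination
-- ===== SOURCE B (Python) =====
-- def gather_includes(section=[], includes_dict={}, destination=[]):
--     _stop = object()
--     stack = [iter(section)]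
--     while stack:
--         q = next(stack[-1], _stop)
--         if q is _stop:
--             stack.pop()
--         elif q[u'type'] == u'include':
--             inner_section = includes_dict.pop(q[u'name'], None)
--             if inner_section is not None:
--                 stack.append(iter(inner_section))
--         else:
--             destination.append(q)
--     return destination
-- ===== Notes on version B (the rewrite author's own statement) =====
-- stated objective: alternative
-- what changed: A's recursive depth-first inlining is replaced by an iterative loop over an explicit stack of iterators (top-of-stack advanced one item per step), preserving the exact pre-order and pop timing while avoiding Python's recursion limit.
import Mathlib
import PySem

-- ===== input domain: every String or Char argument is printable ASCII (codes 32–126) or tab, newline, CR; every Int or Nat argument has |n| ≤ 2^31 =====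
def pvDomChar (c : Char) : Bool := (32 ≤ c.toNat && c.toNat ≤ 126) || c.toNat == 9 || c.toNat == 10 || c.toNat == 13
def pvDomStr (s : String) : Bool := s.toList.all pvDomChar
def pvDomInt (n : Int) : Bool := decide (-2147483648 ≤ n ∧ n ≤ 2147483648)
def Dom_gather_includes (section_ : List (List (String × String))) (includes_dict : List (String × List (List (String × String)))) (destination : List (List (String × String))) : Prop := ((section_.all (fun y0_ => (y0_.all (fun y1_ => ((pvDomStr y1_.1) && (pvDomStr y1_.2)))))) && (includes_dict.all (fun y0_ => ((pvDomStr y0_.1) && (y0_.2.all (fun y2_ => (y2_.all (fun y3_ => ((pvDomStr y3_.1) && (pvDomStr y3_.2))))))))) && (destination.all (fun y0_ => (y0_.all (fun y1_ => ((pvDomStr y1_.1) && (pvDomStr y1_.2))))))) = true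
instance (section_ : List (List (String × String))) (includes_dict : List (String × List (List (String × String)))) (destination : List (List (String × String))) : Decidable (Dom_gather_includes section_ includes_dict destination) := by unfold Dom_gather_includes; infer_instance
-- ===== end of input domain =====

-- B replaces A's recursion by an iterative depth-first loop over an explicit stack of iterators
-- (objective: alternative decomposition, same cost). Both A and B mutate includes_dict (pop) and
-- destination (append) in place identically; the equivalence proved here is about the return value.

-- Shared accessors: q[u'type'] / q[u'name'] on the question dict (total stand-in via getD "";
-- Python raises KeyError on a missing key — those inputs are excluded by Pre_ below).
def pvQType (q : List (String × String)) : String := (PySem.Dict.ofList q).getD "type" ""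
def pvQName (q : List (String × String)) : String := (PySem.Dict.ofList q).getD "name" ""

-- weights used only for the termination measure of port B's loop
def pvDictW (d : PySem.Dict String (List (List (String × String)))) : Nat :=
  (d.items.map (fun p => p.2.length + 1)).sum
def pvStackW (st : List (List (List (String × String)))) : Nat :=
  (st.map (fun f => f.length + 1)).sum

-- termination facts (cited by decreasing_by of port B's loop)
theorem pvSum_filter_map_le {α : Type} (l : List α) (q : α → Bool) (w : α → Nat) :
    ((l.filter q).map w).sum ≤ (l.map w).sum := by
  induction l with
  | nil => simp
  | cons a l ih => by_cases h : q a <;> simp [h] <;> omega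

theorem pvSum_filter_drop {α : Type} (l : List α) (q : α → Bool) (w : α → Nat) (p : α)
    (hmem : p ∈ l) (hq : q p = false) :
    ((l.filter q).map w).sum + w p ≤ (l.map w).sum := by
  induction l with
  | nil => simp at hmem
  | cons a l ih =>
    rcases List.mem_cons.mp hmem with rfl | hm
    · rw [List.filter_cons_of_neg (by simp [hq])]
      have := pvSum_filter_map_le l q w
      simp only [List.map_cons, List.sum_cons]; omega
    · by_cases ha : q a
      · rw [List.filter_cons_of_pos ha]
        have := ih hm; simp only [List.map_cons, List.sum_cons]; omega
      · rw [List.filter_cons_of_neg (by simp [ha])]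
        have := ih hm; simp only [List.map_cons, List.sum_cons]; omega

theorem pvDictW_pop_le (d d' : PySem.Dict String (List (List (String × String))))
    (k : String) (inner : List (List (String × String)))
    (h : d.pop? k = some (inner, d')) : pvDictW d' + inner.length + 1 ≤ pvDictW d := by
  simp only [PySem.Dict.pop?] at h
  cases hg : d.get? k with
  | none => rw [hg] at h; simp at h
  | some v =>
    rw [hg] at h; simp at h
    obtain ⟨h1, h2⟩ := h
    subst h1; subst h2
    simp only [PySem.Dict.get?] at hg
    cases hf : d.items.find? (fun p => p.1 == k) with
    | none => rw [hf] at hg; simp at hg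
    | some p =>
      rw [hf] at hg; simp at hg
      have hmem : p ∈ d.items := List.mem_of_find?_eq_some hf
      have hpk : (p.1 == k) = true := by simpa using List.find?_some hf
      subst hg
      have := pvSum_filter_drop d.items (fun a => !(a.1 == k)) (fun a => a.2.length + 1) p hmem
        (by simp [hpk])
      simpa [pvDictW, PySem.Dict.erase] using this


-- ===== PORT A =====
-- A's recursion, made total with a fuel parameter bounding the nesting depth (each nested call
-- first pops one entry off the dict, so dict-size + 1 fuel is enough and fuel 0 is unreachable).
-- The mutated state (destination, includes_dict) is threaded explicitly and returned as a pair.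
def gatherA : Nat → List (List (String × String)) → PySem.Dict String (List (List (String × String))) → List (List (String × String)) → (List (List (String × String)) × PySem.Dict String (List (List (String × String))))
  | 0, _, d, dest => (dest, d)
  | _ + 1, [], d, dest => (dest, d)
  | f + 1, q :: rest, d, dest =>
    if pvQType q = "include" then
      match d.pop? (pvQName q) with
      | some (inner, d') =>
        let r := gatherA f inner d' dest
        gatherA (f + 1) rest r.2 r.1
      | none => gatherA (f + 1) rest d dest
    else
      gatherA (f + 1) rest d (dest ++ [q])
termination_by f sec _ _ => (f, sec.length)

def gather_includes (section_ : List (List (String × String))) (includes_dict : List (String × List (List (String × String)))) (destination : List (List (String × String))) : List (List (String × String)) :=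
  (gatherA ((PySem.Dict.ofList includes_dict).items.length + 1) section_ (PySem.Dict.ofList includes_dict) destination).1

-- ===== PORT B =====
-- B's loop: a stack of iterators, each iterator represented by its list of remaining items
-- (top of stack = head).  One step = one iteration of B's while loop.
def loopB : List (List (List (String × String))) → PySem.Dict String (List (List (String × String))) → List (List (String × String)) → List (List (String × String))
  | [], _, dest => dest
  | [] :: stack, d, dest => loopB stack d dest            -- iterator exhausted: pop it
  | (q :: qs) :: stack, d, dest =>
    if pvQType q = "include" then
      match h : d.pop? (pvQName q) with
      | some (inner, d') => loopB (inner :: qs :: stack) d' dest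
      | none => loopB (qs :: stack) d dest
    else
      loopB (qs :: stack) d (dest ++ [q])
termination_by stack d _ => pvStackW stack + pvDictW d
decreasing_by
  · simp [pvStackW]
  · have := pvDictW_pop_le d d' (pvQName q) inner h
    simp [pvStackW]; omega
  · simp [pvStackW]
  · simp [pvStackW]

def gather_includes_alt (section_ : List (List (String × String))) (includes_dict : List (String × List (List (String × String)))) (destination : List (List (String × String))) : List (List (String × String)) :=
  loopB [section_] (PySem.Dict.ofList includes_dict) destination

-- ===== PRECONDITION & SPEC =====
-- Pre_ excludes inputs on which the Python raises KeyError: a question dict lacking a 'type'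
-- key, or an include question lacking a 'name' key.  Every question in section_ must be good,
-- and every includes_dict value whose key occurs anywhere as an include name (the only values
-- A can ever reach) must contain only good questions — still slightly stricter than "A
-- returns", since a mentioned value may nevertheless stay unreached (see claim.json cites).
def pvGoodQ (q : List (String × String)) : Bool :=
  (PySem.Dict.ofList q).contains "type" &&
    (pvQType q != "include" || (PySem.Dict.ofList q).contains "name")

-- every name used by an include question anywhere in the input
def pvMentioned (section_ : List (List (String × String))) (includes_dict : List (String × List (List (String × String)))) : List String :=
  (section_.filter (fun q => pvQType q == "include")).map pvQName ++
    includes_dict.flatMap (fun p => (p.2.filter (fun q => pvQType q == "include")).map pvQName)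

def Pre_gather_includes (section_ : List (List (String × String))) (includes_dict : List (String × List (List (String × String)))) (destination : List (List (String × String))) : Prop :=
  (section_.all pvGoodQ &&
    includes_dict.all (fun p =>
      !(pvMentioned section_ includes_dict).contains p.1 || p.2.all pvGoodQ)) = true
instance (section_ : List (List (String × String))) (includes_dict : List (String × List (List (String × String)))) (destination : List (List (String × String))) : Decidable (Pre_gather_includes section_ includes_dict destination) := by unfold Pre_gather_includes; infer_instance

def pvWitness_gather_includes : (List (List (String × String))) × (List (String × List (List (String × String)))) × (List (List (String × String))) :=
  ([[("type", "include"), ("name", "a")], [("type", "text"), ("name", "q1")]],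
   [("a", [[("type", "note"), ("name", "n1")]])],
   [])

def Spec_gather_includes (section_ : List (List (String × String))) (includes_dict : List (String × List (List (String × String)))) (destination : List (List (String × String))) (out : List (List (String × String))) : Prop := out = gather_includes_alt section_ includes_dict destination
instance (section_ : List (List (String × String))) (includes_dict : List (String × List (List (String × String)))) (destination : List (List (String × String))) (out : List (List (String × String))) : Decidable (Spec_gather_includes section_ includes_dict destination out) := by unfold Spec_gather_includes; infer_instance

-- ===== CLAIM (what is proved, stated in full; the proofs are below) =====
def Claim_equal_gather_includes : Prop := ∀ (section_ : List (List (String × String))) (includes_dict : List (String × List (List (String × String)))) (destination : List (List (String × String))), Dom_gather_includes section_ includes_dict destination → Pre_gather_includes section_ includes_dict destination → Spec_gather_includes section_ includes_dict destination (gather_includes section_ includes_dict destination)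

-- ===== LEMMAS AND PROOFS =====

theorem pvDictSize_pop_lt (d : PySem.Dict String (List (List (String × String))))
    (k : String) (r : (List (List (String × String))) × PySem.Dict String (List (List (String × String))))
    (h : d.pop? k = some r) : r.2.items.length < d.items.length := by
  simp only [PySem.Dict.pop?] at h
  cases hg : d.get? k with
  | none => rw [hg] at h; simp at h
  | some v =>
    rw [hg] at h
    have hr2 : r.2 = d.erase k := by
      have h' : (v, d.erase k) = r := by simpa using h
      rw [← h']
    simp only [PySem.Dict.get?] at hg
    cases hf : d.items.find? (fun p => p.1 == k) with
    | none => rw [hf] at hg; simp at hg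
    | some p =>
      have hmem : p ∈ d.items := List.mem_of_find?_eq_some hf
      have hpk : (p.1 == k) = true := by simpa using List.find?_some hf
      rw [hr2]
      show (d.items.filter (fun p => !(p.1 == k))).length < d.items.length
      rw [List.length_filter_lt_length_iff_exists]
      exact ⟨p, hmem, by simp [hpk]⟩

-- gatherA only removes dict entries: the dict component never grows
theorem gatherA_size_le (f : Nat) (sec : List (List (String × String)))
    (d : PySem.Dict String (List (List (String × String)))) (dest : List (List (String × String))) :
    (gatherA f sec d dest).2.items.length ≤ d.items.length := by
  induction f, sec, d, dest using gatherA.induct with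
  | case1 x d dest => simp [gatherA]
  | case2 n d dest => simp [gatherA]
  | case3 f q rest d dest ht inner d' hpop r ih1 ih2 =>
    have hr : r = gatherA f inner d' dest := rfl
    simp only [hr] at ih1 ih2
    rw [gatherA, if_pos ht, hpop]
    show (gatherA (f + 1) rest (gatherA f inner d' dest).2 (gatherA f inner d' dest).1).2.items.length ≤ d.items.length
    have hlt : d'.items.length < d.items.length := pvDictSize_pop_lt d (pvQName q) (inner, d') hpop
    omega
  | case4 f q rest d dest ht hpop ih =>
    rw [gatherA, if_pos ht, hpop]; exact ih
  | case5 f q rest d dest ht ih =>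
    rw [gatherA, if_neg ht]; exact ih

-- the bridge: with enough fuel, running A on the top frame of the stack and then B on the
-- rest of the stack is one and the same as running B on the whole stack
theorem pv_bridge (f : Nat) (sec : List (List (String × String)))
    (d : PySem.Dict String (List (List (String × String)))) (dest : List (List (String × String))) :
    ∀ stack, d.items.length < f →
      loopB (sec :: stack) d dest = loopB stack (gatherA f sec d dest).2 (gatherA f sec d dest).1 := by
  induction f, sec, d, dest using gatherA.induct with
  | case1 x d dest => intro _ hf; omega
  | case2 n d dest => intro stack hf; simp [gatherA, loopB]
  | case3 f q rest d dest ht inner d' hpop r ih1 ih2 =>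
    intro stack hf
    rw [loopB, if_pos ht, gatherA, if_pos ht, hpop]
    split
    next inner2 d2 h2 =>
      injection h2 with h3
      injection h3 with h4 h5
      subst h4; subst h5
      have hd' : d'.items.length < f := by
        have hlt : d'.items.length < d.items.length := pvDictSize_pop_lt d (pvQName q) (inner, d') hpop
        omega
      rw [ih1 (rest :: stack) hd']
      have hd'' : (gatherA f inner d' dest).2.items.length < f + 1 := by
        have := gatherA_size_le f inner d' dest; omega
      exact ih2 stack hd''
    next h2 => simp at h2
  | case4 f q rest d dest ht hpop ih =>
    intro stack hf
    rw [loopB, if_pos ht, gatherA, if_pos ht, hpop]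
    split
    next inner2 d2 h2 => simp at h2
    next h2 => exact ih stack hf
  | case5 f q rest d dest ht ih =>
    intro stack hf
    rw [loopB, if_neg ht, gatherA, if_neg ht]
    exact ih stack hf

-- ===== VERDICT (by name: the statement is the Claim_ definition above) =====
theorem gather_includes_spec : Claim_equal_gather_includes := by
  intro section_ includes_dict destination _ _
  show gather_includes section_ includes_dict destination
      = gather_includes_alt section_ includes_dict destination
  unfold gather_includes gather_includes_alt
  rw [pv_bridge ((PySem.Dict.ofList includes_dict).items.length + 1) section_
        (PySem.Dict.ofList includes_dict) destination [] (by omega)]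
  rw [loopB]
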